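-- pv_equiv track=rewrite | github.com/jdav892/DailySolutions | where_is_parent.py | find_children
-- ===== SOURCE A (Python) =====
-- def find_children(dancing_brigade):
--     parents = []
--     children = []
--
--     for char in dancing_brigade:
--         if char.isupper():
--             parents.append(char)
--         elif char.islower():
--             children.append(char)
--
--     parents.sort()
--
--
--     line = ''
--     for parent in parents:
--         line += parent
--         for child in sorted(children):
--             if child.upper() == parent:
--                 line += child
--     return line
-- ===== SOURCE B (Python) =====
-- def find_children(dancing_brigade):
--     parents = []
--     children = []
--     for ch in dancing_brigade:
--         if ch.isupper():
--             parents.append(ch)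
--         elif ch.islower():
--             children.append(ch)
--     buckets = {}
--     for c in sorted(children):
--         buckets.setdefault(c.upper(), []).append(c)
--     parents.sort()
--     return ''.join(p + ''.join(buckets.get(p, [])) for p in parents)
-- ===== Notes on version B (the rewrite author's own statement) =====
-- stated objective: alternative
-- what changed: A re-sorts the children list and rescans all of it for every parent; B sorts the children once, groups them into a dict of buckets keyed by their uppercase letter, and emits each sorted parent with a single dict lookup.
import Mathlib
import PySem

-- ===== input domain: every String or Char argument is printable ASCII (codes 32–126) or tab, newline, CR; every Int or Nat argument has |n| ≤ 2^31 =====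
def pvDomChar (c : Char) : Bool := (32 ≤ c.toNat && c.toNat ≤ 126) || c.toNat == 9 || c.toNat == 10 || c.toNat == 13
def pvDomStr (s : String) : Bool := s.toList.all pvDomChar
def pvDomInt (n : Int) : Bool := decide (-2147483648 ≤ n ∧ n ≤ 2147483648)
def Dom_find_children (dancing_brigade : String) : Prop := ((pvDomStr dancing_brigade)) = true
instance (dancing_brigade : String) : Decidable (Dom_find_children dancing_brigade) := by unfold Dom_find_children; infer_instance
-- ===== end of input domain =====

-- B sorts the children once and groups them into a dict of buckets keyed by the
-- uppercase letter, replacing A's per-parent re-sort and rescan of the children list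
-- (objective: alternative algorithm; not measured faster on the timing inputs).


-- ===== PORT A =====
def find_children (dancing_brigade : String) : String :=
  -- the for loop appending to the two lists parents / children
  let pc : List Char × List Char := dancing_brigade.toList.foldl
    (fun (st : List Char × List Char) char =>
      if PySem.Chars.isupper char then (st.1 ++ [char], st.2)
      else if PySem.Chars.islower char then (st.1, st.2 ++ [char])
      else st) ([], [])
  let parents := PySem.List.sorted pc.1 (fun x => x) false   -- parents.sort()
  let children := pc.2
  -- line = ''; nested for loops; 'sorted(children)' recomputed inside each outer iteration
  let line : List Char := parents.foldl
    (fun line parent =>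
      (PySem.List.sorted children (fun x => x) false).foldl
        (fun line child =>
          if PySem.Chars.upperChar child == parent then line ++ [child] else line)
        (line ++ [parent]))
    []
  String.mk line

-- ===== PORT B =====
def find_children_alt (dancing_brigade : String) : String :=
  -- same collecting pass as Source B
  let pc : List Char × List Char := dancing_brigade.toList.foldl
    (fun (st : List Char × List Char) ch =>
      if PySem.Chars.isupper ch then (st.1 ++ [ch], st.2)
      else if PySem.Chars.islower ch then (st.1, st.2 ++ [ch])
      else st) ([], [])
  -- buckets.setdefault(c.upper(), []).append(c)  over sorted(children)  (= Dict.modify)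
  let buckets : PySem.Dict Char (List Char) :=
    (PySem.List.sorted pc.2 (fun x => x) false).foldl
      (fun d c => d.modify (PySem.Chars.upperChar c) [] (fun b => b ++ [c]))
      PySem.Dict.empty
  let parents := PySem.List.sorted pc.1 (fun x => x) false   -- parents.sort()
  -- ''.join(p + ''.join(buckets.get(p, [])) for p in parents)
  String.mk (parents.flatMap (fun p => p :: buckets.getD p []))

-- ===== PRECONDITION & SPEC =====
def Spec_find_children (dancing_brigade : String) (out : String) : Prop := out = find_children_alt dancing_brigade
instance (dancing_brigade : String) (out : String) : Decidable (Spec_find_children dancing_brigade out) := by unfold Spec_find_children; infer_instance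

-- ===== CLAIM (what is proved, stated in full; the proofs are below) =====
def Claim_equal_find_children : Prop := ∀ (dancing_brigade : String), Dom_find_children dancing_brigade → Spec_find_children dancing_brigade (find_children dancing_brigade)

-- ===== LEMMAS AND PROOFS =====

-- B's bucket for letter p collects, in order, exactly the children whose uppercase is p.
theorem bucket_getD (cs : List Char) (d : PySem.Dict Char (List Char)) (p : Char) :
    (cs.foldl
      (fun d c => d.modify (PySem.Chars.upperChar c) [] (fun b => b ++ [c]))
      d).getD p []
    = d.getD p [] ++ cs.filter (fun c => PySem.Chars.upperChar c == p) := by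
  induction cs generalizing d with
  | nil => simp
  | cons c cs ih =>
    simp only [List.foldl_cons, List.filter_cons]
    by_cases h : PySem.Chars.upperChar c = p
    · subst h
      rw [ih, PySem.Dict.getD_modify_self]
      simp
    · rw [ih, PySem.Dict.getD_modify_of_ne _ _ _ (fun he => h he.symm)]
      simp [h]

-- ===== VERDICT (by name: the statement is the Claim_ definition above) =====
theorem find_children_spec : Claim_equal_find_children := by
  intro s _
  unfold Spec_find_children find_children find_children_alt
  simp only
  congr 1
  rw [PySem.List.foldl_congr_mem _ _
    (fun line parent => line ++
      (parent :: (PySem.List.sorted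
        (s.toList.foldl (fun (st : List Char × List Char) ch =>
          if PySem.Chars.isupper ch then (st.1 ++ [ch], st.2)
          else if PySem.Chars.islower ch then (st.1, st.2 ++ [ch])
          else st) ([], [])).2 (fun x => x) false).filter
          (fun c => PySem.Chars.upperChar c == parent))) _
    (by
      intro acc p _
      rw [PySem.List.foldl_append_if_eq_filter (fun c => PySem.Chars.upperChar c == p)]
      simp)]
  rw [PySem.List.foldl_append_eq_flatMap]
  simp only [List.nil_append]
  apply List.flatMap_congr
  intro p _
  rw [bucket_getD]
  simp [PySem.Dict.getD, PySem.Dict.get?, PySem.Dict.empty]
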